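-- pv_equiv track=rewrite | github.com/Ssereno/AI-Code-Review-CLI | src/git_utils.py | filter_diff_by_extensions
-- ===== SOURCE A (Python) =====
-- class GitError(Exception):
--     """Exception for Git-related errors."""
--     pass
--
-- def filter_diff_by_extensions(diff: str, extensions: list[str]) -> str:
--     """
--     Filters the diff to include only files with specific extensions.
--
--     Args:
--         diff: The full diff.
--         extensions: List of extensions (e.g., ['.py', '.js', '.cs']).
--     """
--     if not extensions:
--         return diff
--
--     filtered_sections = []
--     current_section = []
--     include_section = False
--
--     for line in diff.split("\n"):
--         if line.startswith("diff --git"):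
--             # Save previous section if applicable
--             if include_section and current_section:
--                 filtered_sections.append("\n".join(current_section))
--             current_section = [line]
--             # Check if file has an allowed extension
--             file_path = line.split(" b/")[-1] if " b/" in line else ""
--             include_section = any(file_path.endswith(ext) for ext in extensions)
--         else:
--             current_section.append(line)
--
--     # Last section
--     if include_section and current_section:
--         filtered_sections.append("\n".join(current_section))
--
--     result = "\n".join(filtered_sections)
--     if not result.strip():
--         raise GitError(
--             f"After filtering by extensions {extensions}, no changes remain."
--         )
--     return result
-- ===== SOURCE B (Python) =====
-- class GitError(Exception):
--     """Exception for Git-related errors."""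
--     pass
--
--
-- def _line_selected(line, extensions):
--     """Does a 'diff --git' header line name a file with one of the extensions?"""
--     file_path = line.split(" b/")[-1] if " b/" in line else ""
--     return any(file_path.endswith(ext) for ext in extensions)
--
--
-- def _sections(lines):
--     """Recursively split lines into (sections, preamble): sections start at each
--     'diff --git' header; preamble = lines before the first header."""
--     if not lines:
--         return [], []
--     secs, pre = _sections(lines[1:])
--     head = lines[0]
--     if head.startswith("diff --git"):
--         return [[head] + pre] + secs, []
--     return secs, [head] + pre
--
--
-- def filter_diff_by_extensions(diff, extensions):
--     if not extensions:
--         return diff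
--     secs, _preamble = _sections(diff.split("\n"))
--     result = "\n".join(
--         "\n".join(sec) for sec in secs if _line_selected(sec[0], extensions)
--     )
--     if not result.strip():
--         raise GitError(
--             f"After filtering by extensions {extensions}, no changes remain."
--         )
--     return result
-- ===== Notes on version B (the rewrite author's own statement) =====
-- stated objective: alternative
-- what changed: Replaces A's single stateful loop (carrying current section, inclusion flag and output list) by a two-phase decomposition: a recursive splitter that partitions the lines into header-started sections plus a discarded preamble, followed by a filter-and-join over the sections.
import Mathlib
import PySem

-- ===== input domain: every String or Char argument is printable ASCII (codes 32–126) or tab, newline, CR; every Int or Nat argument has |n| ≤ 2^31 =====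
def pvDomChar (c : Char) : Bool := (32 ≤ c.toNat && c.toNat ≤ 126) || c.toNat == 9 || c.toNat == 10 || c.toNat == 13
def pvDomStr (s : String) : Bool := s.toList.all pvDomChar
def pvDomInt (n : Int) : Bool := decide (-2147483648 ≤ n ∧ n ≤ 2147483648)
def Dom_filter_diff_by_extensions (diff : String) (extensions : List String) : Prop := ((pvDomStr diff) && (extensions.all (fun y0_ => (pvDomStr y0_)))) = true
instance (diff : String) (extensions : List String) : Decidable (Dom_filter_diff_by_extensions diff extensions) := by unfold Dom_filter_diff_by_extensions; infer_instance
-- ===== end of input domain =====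

-- B replaces A's single stateful loop by a two-phase decomposition (split into sections, then
-- filter and join); return-value equivalence is proved on Pre_ (where the Python A returns).

-- shared helper: both Pythons compute the header-selection test with this same expression
-- (file_path = line.split(" b/")[-1] if " b/" in line else ""; any(file_path.endswith(ext) ...))
def pvSelLine (line : String) (extensions : List String) : Bool :=
  let file_path := if PySem.Str.isIn " b/" line then ((PySem.Str.split? line " b/").getD []).getLastD "" else ""
  extensions.any (fun ext => PySem.Str.endswith file_path ext)

-- ===== PORT A =====
-- the for-loop over diff.split("\n") with state (filtered_sections, current_section, include_section),
-- the final flush folded into the base case; where the Python raises GitError it returns "" (outside Pre_)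
def pvLoopA (extensions : List String) : List String → List String → List String → Bool → List String
  | [], acc, cur, inc =>
      if inc && !cur.isEmpty then acc ++ [PySem.Str.join "\n" cur] else acc
  | l :: ls, acc, cur, inc =>
      if PySem.Str.startswith l "diff --git" then
        pvLoopA extensions ls
          (if inc && !cur.isEmpty then acc ++ [PySem.Str.join "\n" cur] else acc)
          [l] (pvSelLine l extensions)
      else
        pvLoopA extensions ls acc (cur ++ [l]) inc

def filter_diff_by_extensions (diff : String) (extensions : List String) : String :=
  if extensions = [] then diff
  else
    let filtered := pvLoopA extensions ((PySem.Str.split? diff "\n").getD []) [] [] false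
    let result := PySem.Str.join "\n" filtered
    if PySem.Str.strip result = "" then "" else result

-- ===== PORT B =====
-- recursive splitter: (sections starting at each 'diff --git' header, preamble before the first header)
def pvSections : List String → List (List String) × List String
  | [] => ([], [])
  | head :: tail =>
      let sp := pvSections tail
      if PySem.Str.startswith head "diff --git" then (([head] ++ sp.2) :: sp.1, [])
      else (sp.1, [head] ++ sp.2)

def filter_diff_by_extensions_alt (diff : String) (extensions : List String) : String :=
  if extensions = [] then diff
  else
    let secs := (pvSections ((PySem.Str.split? diff "\n").getD [])).1
    let result := PySem.Str.join "\n"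
      ((secs.filter (fun sec => pvSelLine (sec.headD "") extensions)).map (PySem.Str.join "\n"))
    if PySem.Str.strip result = "" then "" else result

-- ===== PRECONDITION & SPEC =====
-- Pre_ excludes exactly the inputs on which the Python A raises GitError: a nonempty extension
-- list with no matching 'diff --git' header line in the diff (B raises GitError there too).
def Pre_filter_diff_by_extensions (diff : String) (extensions : List String) : Prop :=
  extensions = [] ∨
    ((PySem.Str.split? diff "\n").getD []).any
      (fun l => PySem.Str.startswith l "diff --git" && pvSelLine l extensions) = true
instance (diff : String) (extensions : List String) : Decidable (Pre_filter_diff_by_extensions diff extensions) := by unfold Pre_filter_diff_by_extensions; infer_instance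

def pvWitness_filter_diff_by_extensions : String × List String :=
  ("diff --git a/x.py b/x.py\n+print(1)", [".py"])

def Spec_filter_diff_by_extensions (diff : String) (extensions : List String) (out : String) : Prop := out = filter_diff_by_extensions_alt diff extensions
instance (diff : String) (extensions : List String) (out : String) : Decidable (Spec_filter_diff_by_extensions diff extensions out) := by unfold Spec_filter_diff_by_extensions; infer_instance

-- ===== CLAIM (what is proved, stated in full; the proofs are below) =====
def Claim_equal_filter_diff_by_extensions : Prop := ∀ (diff : String) (extensions : List String), Dom_filter_diff_by_extensions diff extensions → Pre_filter_diff_by_extensions diff extensions → Spec_filter_diff_by_extensions diff extensions (filter_diff_by_extensions diff extensions)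

-- ===== LEMMAS AND PROOFS =====

-- the loop of A, run from any state, produces the already-flushed sections, the pending section
-- extended by the preamble of the remaining lines, and the selected sections of the remainder
theorem pvLoopA_eq_sections (extensions : List String) :
    ∀ (lines acc cur : List String) (inc : Bool), (inc = true → cur ≠ []) →
      pvLoopA extensions lines acc cur inc =
        acc ++ (if inc then [PySem.Str.join "\n" (cur ++ (pvSections lines).2)] else [])
            ++ (((pvSections lines).1.filter
                  (fun sec => pvSelLine (sec.headD "") extensions)).map (PySem.Str.join "\n")) := by
  intro lines
  induction lines with
  | nil =>
      intro acc cur inc h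
      cases inc with
      | false => simp [pvLoopA, pvSections]
      | true => simp [pvLoopA, pvSections, h rfl]
  | cons l ls ih =>
      intro acc cur inc h
      by_cases hl : PySem.Str.startswith l "diff --git" = true
      · have key := ih (if inc && !cur.isEmpty then acc ++ [PySem.Str.join "\n" cur] else acc)
          [l] (pvSelLine l extensions) (by simp)
        simp only [pvLoopA, hl, if_true]
        rw [key]
        simp only [pvSections, hl, if_true]
        cases inc with
        | false =>
            by_cases hsel : pvSelLine l extensions = true <;>
              simp [hsel]
        | true =>
            by_cases hsel : pvSelLine l extensions = true <;>
              simp [hsel, h rfl]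
      · have hl' : PySem.Str.startswith l "diff --git" = false := by
          simpa using hl
        have key := ih acc (cur ++ [l]) inc (by simp)
        simp only [pvLoopA, hl', Bool.false_eq_true, if_false]
        rw [key]
        simp only [pvSections, hl', Bool.false_eq_true, if_false]
        cases inc with
        | false => simp
        | true => simp

-- ===== VERDICT (by name: the statement is the Claim_ definition above) =====
theorem filter_diff_by_extensions_spec : Claim_equal_filter_diff_by_extensions := by
  intro diff extensions _hdom _hpre
  unfold Spec_filter_diff_by_extensions filter_diff_by_extensions filter_diff_by_extensions_alt
  by_cases hext : extensions = []
  · simp [hext]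
  · simp only [hext, if_neg, not_false_iff]
    rw [pvLoopA_eq_sections extensions ((PySem.Str.split? diff "\n").getD []) [] [] false (by simp)]
    simp
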